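-- pv_equiv track=rewrite | github.com/ivanlozovskis/Habitify2 | dev.py | calculate_box_coordinates
-- ===== SOURCE A (Python) =====
-- def calculate_box_coordinates(frame_width, frame_height, box_size, padding, box_count):
--     """figuring out each habit box placement"""
--     coordinates = []
--     x_position = padding
--     y_position = padding
--
--     # Calculate how many boxes fit in one row
--     boxes_per_row = (frame_width - padding) // (box_size + padding)
--
--     for i in range(box_count):
--         # Add the current box's coordinates
--         coordinates.append((x_position, y_position))
--
--         # Update x_position for the next box
--         x_position += box_size + padding
--
--         # If we've reached the end of the row, reset x_position and move to the next row
--         if (i + 1) % boxes_per_row == 0: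
--             x_position = padding
--             y_position += box_size + padding
--
--     return coordinates
-- ===== SOURCE B (Python) =====
-- def calculate_box_coordinates(frame_width, frame_height, box_size, padding, box_count):
--     """figuring out each habit box placement"""
--     step = box_size + padding
--     boxes_per_row = (frame_width - padding) // step
--     return [(padding + (i % boxes_per_row) * step,
--              padding + (i // boxes_per_row) * step)
--             for i in range(box_count)]
-- ===== Notes on version B (the rewrite author's own statement) =====
-- stated objective: simpler
-- what changed: Replaces A's mutable x/y accumulators and wraparound reset with a stateless per-index closed form (i % boxes_per_row, i // boxes_per_row); Pre_ excludes ZeroDivisionError inputs and the degenerate nonpositive row capacity, where no layout value is specified and A's wraparound is as arbitrary as any other.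
-- outside the precondition, e.g. on calculate_box_coordinates(0, 0, 2, 1, 3): A returns [(1, 1), (1, 4), (1, 7)], B returns [(1, 1), (1, -2), (1, -5)]
import Mathlib
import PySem

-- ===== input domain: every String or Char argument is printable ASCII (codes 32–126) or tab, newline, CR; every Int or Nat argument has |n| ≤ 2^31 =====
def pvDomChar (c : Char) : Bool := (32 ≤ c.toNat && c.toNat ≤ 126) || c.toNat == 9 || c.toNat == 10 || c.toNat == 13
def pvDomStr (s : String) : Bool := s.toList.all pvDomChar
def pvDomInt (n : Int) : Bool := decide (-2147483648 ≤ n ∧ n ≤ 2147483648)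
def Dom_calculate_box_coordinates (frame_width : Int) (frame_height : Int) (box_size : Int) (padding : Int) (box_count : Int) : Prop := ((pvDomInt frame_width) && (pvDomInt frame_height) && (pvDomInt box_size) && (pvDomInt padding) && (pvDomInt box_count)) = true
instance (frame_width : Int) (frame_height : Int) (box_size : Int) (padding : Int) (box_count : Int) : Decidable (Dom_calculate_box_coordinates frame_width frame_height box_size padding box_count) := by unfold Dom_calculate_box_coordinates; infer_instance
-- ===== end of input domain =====

-- B replaces A's mutable x/y accumulators and wraparound reset with a stateless
-- per-index closed form (i % boxes_per_row, i // boxes_per_row); same O(box_count) cost.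


-- ===== PORT A =====
def calculate_box_coordinates (frame_width : Int) (frame_height : Int) (box_size : Int) (padding : Int) (box_count : Int) : List (Int × Int) :=
  let boxes_per_row := PySem.Int.floordiv (frame_width - padding) (box_size + padding)
  ((PySem.List.pyRange 0 box_count 1).foldl
    (fun (st : List (Int × Int) × Int × Int) (i : Int) =>
      let coordinates := st.1 ++ [(st.2.1, st.2.2)]
      let x_position := st.2.1 + (box_size + padding)
      if PySem.Int.mod (i + 1) boxes_per_row = 0 then
        (coordinates, padding, st.2.2 + (box_size + padding))
      else
        (coordinates, x_position, st.2.2))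
    (([] : List (Int × Int)), padding, padding)).1

-- ===== PORT B =====
def calculate_box_coordinates_alt (frame_width : Int) (frame_height : Int) (box_size : Int) (padding : Int) (box_count : Int) : List (Int × Int) :=
  let step := box_size + padding
  let boxes_per_row := PySem.Int.floordiv (frame_width - padding) step
  (PySem.List.pyRange 0 box_count 1).map
    (fun i =>
      (padding + PySem.Int.mod i boxes_per_row * step,
       padding + PySem.Int.floordiv i boxes_per_row * step))

-- ===== PRECONDITION & SPEC =====
-- Pre_ excludes the inputs where A raises ZeroDivisionError (box_size + padding == 0,
-- or boxes_per_row == 0 with box_count > 0), and the degenerate corner of a NEGATIVE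
-- row capacity with boxes requested, where no layout value is specified and A's
-- wraparound is as arbitrary as B's floor-division placement.
def Pre_calculate_box_coordinates (frame_width : Int) (frame_height : Int) (box_size : Int) (padding : Int) (box_count : Int) : Prop :=
  box_size + padding ≠ 0 ∧
    (0 < box_count → 0 < PySem.Int.floordiv (frame_width - padding) (box_size + padding))
instance (frame_width : Int) (frame_height : Int) (box_size : Int) (padding : Int) (box_count : Int) : Decidable (Pre_calculate_box_coordinates frame_width frame_height box_size padding box_count) := by unfold Pre_calculate_box_coordinates; infer_instance

def pvWitness_calculate_box_coordinates : Int × Int × Int × Int × Int := (100, 50, 20, 5, 7)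

def Spec_calculate_box_coordinates (frame_width : Int) (frame_height : Int) (box_size : Int) (padding : Int) (box_count : Int) (out : List (Int × Int)) : Prop := out = calculate_box_coordinates_alt frame_width frame_height box_size padding box_count
instance (frame_width : Int) (frame_height : Int) (box_size : Int) (padding : Int) (box_count : Int) (out : List (Int × Int)) : Decidable (Spec_calculate_box_coordinates frame_width frame_height box_size padding box_count out) := by unfold Spec_calculate_box_coordinates; infer_instance

-- ===== CLAIM (what is proved, stated in full; the proofs are below) =====
def Claim_equal_calculate_box_coordinates : Prop := ∀ (frame_width : Int) (frame_height : Int) (box_size : Int) (padding : Int) (box_count : Int), Dom_calculate_box_coordinates frame_width frame_height box_size padding box_count → Pre_calculate_box_coordinates frame_width frame_height box_size padding box_count → Spec_calculate_box_coordinates frame_width frame_height box_size padding box_count (calculate_box_coordinates frame_width frame_height box_size padding box_count)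

-- ===== LEMMAS AND PROOFS =====

-- stepping n to n+1 when B divides n+1: the row wraps
lemma pv_succ_dvd (B n : Int) (hB : 0 < B) (hd : B ∣ n + 1) :
    (n + 1) % B = 0 ∧ (n + 1) / B = n / B + 1 := by
  have h0 : B * (n / B) + n % B = n := Int.ediv_add_emod n B
  have hr0 : 0 ≤ n % B := Int.emod_nonneg n hB.ne'
  have hrB : n % B < B := Int.emod_lt_of_pos n hB
  have hd' : B ∣ (n % B + 1) := by
    have he : n % B + 1 = n + 1 - B * (n / B) := by omega
    exact he ▸ dvd_sub hd (Dvd.intro _ rfl)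
  have hrB' : n % B + 1 = B := by
    have := Int.le_of_dvd (by omega) hd'
    omega
  have h := (Int.ediv_emod_unique (a := n + 1) (b := B) (r := 0) (q := n / B + 1) hB).mpr
    ⟨by linarith [h0, hrB', mul_add B (n / B) 1], le_refl 0, hB⟩
  exact ⟨h.2, h.1⟩

-- stepping n to n+1 when B does not divide n+1: same row, next column
lemma pv_succ_not_dvd (B n : Int) (hB : 0 < B) (hd : ¬ B ∣ n + 1) :
    (n + 1) % B = n % B + 1 ∧ (n + 1) / B = n / B := by
  have h0 : B * (n / B) + n % B = n := Int.ediv_add_emod n B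
  have hr0 : 0 ≤ n % B := Int.emod_nonneg n hB.ne'
  have hrB : n % B < B := Int.emod_lt_of_pos n hB
  have hlt : n % B + 1 < B := by
    by_contra hcon
    exact hd ⟨n / B + 1, by have := mul_add B (n / B) 1; omega⟩
  have h := (Int.ediv_emod_unique (a := n + 1) (b := B) (r := n % B + 1) (q := n / B) hB).mpr
    ⟨by linarith [h0], by omega, hlt⟩
  exact ⟨h.2, h.1⟩

-- the loop invariant: after m iterations A's state is B's closed form at index m
lemma pv_loop_inv (box_size padding bpr : Int) (hB : 0 < bpr) (m : Nat) :
    (PySem.List.pyRange 0 (m : Int) 1).foldl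
      (fun (st : List (Int × Int) × Int × Int) (i : Int) =>
        let coordinates := st.1 ++ [(st.2.1, st.2.2)]
        let x_position := st.2.1 + (box_size + padding)
        if PySem.Int.mod (i + 1) bpr = 0 then
          (coordinates, padding, st.2.2 + (box_size + padding))
        else
          (coordinates, x_position, st.2.2))
      (([] : List (Int × Int)), padding, padding)
    = ((PySem.List.pyRange 0 (m : Int) 1).map
         (fun i => (padding + PySem.Int.mod i bpr * (box_size + padding),
                    padding + PySem.Int.floordiv i bpr * (box_size + padding))),
       padding + PySem.Int.mod (m : Int) bpr * (box_size + padding),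
       padding + PySem.Int.floordiv (m : Int) bpr * (box_size + padding)) := by
  induction m with
  | zero =>
      simp [PySem.Int.mod_eq_emod_of_pos hB,
            PySem.Int.floordiv_eq_ediv_of_pos hB]
  | succ m ih =>
      have hcast : ((m + 1 : Nat) : Int) = (m : Int) + 1 := by push_cast; ring
      rw [hcast, PySem.List.pyRange_one_succ_right (by positivity), List.foldl_append, ih]
      simp only [List.foldl_cons, List.foldl_nil, List.map_append, List.map_cons, List.map_nil]
      simp only [PySem.Int.mod_eq_zero_iff_dvd]
      by_cases hd : bpr ∣ (m : Int) + 1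
      · obtain ⟨h1, h2⟩ := pv_succ_dvd bpr (m : Int) hB hd
        rw [if_pos hd]
        simp only [PySem.Int.mod_eq_emod_of_pos hB, PySem.Int.floordiv_eq_ediv_of_pos hB,
          h1, h2, Prod.mk.injEq]
        exact ⟨trivial, by ring, by ring⟩
      · obtain ⟨h1, h2⟩ := pv_succ_not_dvd bpr (m : Int) hB hd
        rw [if_neg hd]
        simp only [PySem.Int.mod_eq_emod_of_pos hB, PySem.Int.floordiv_eq_ediv_of_pos hB,
          h1, h2, Prod.mk.injEq]
        exact ⟨trivial, by ring, trivial⟩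

-- ===== VERDICT (by name: the statement is the Claim_ definition above) =====
theorem calculate_box_coordinates_spec : Claim_equal_calculate_box_coordinates := by
  intro frame_width frame_height box_size padding box_count _ hpre
  obtain ⟨hstep, hbpr⟩ := hpre
  unfold Spec_calculate_box_coordinates calculate_box_coordinates calculate_box_coordinates_alt
  by_cases hn : 0 < box_count
  · have hbpr' := hbpr hn
    have hcast : box_count = ((box_count.toNat : Nat) : Int) := by omega
    rw [hcast]
    exact congrArg Prod.fst
      (pv_loop_inv box_size padding _ hbpr' box_count.toNat)
  · rw [PySem.List.pyRange_one_eq_nil (by omega)]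
    simp
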